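-- pv_equiv track=rewrite | github.com/aisingapore/sgnlp | sgnlp/models/rst_pointer/data_prep.py | get_edu_spans
-- ===== SOURCE A (Python) =====
-- def get_edu_spans(sentences, edus):
--     edu_spans = []
--     edu_idx = 0
--     for sentence in sentences:
--         formed_sentence = ""
--         start_idx = edu_idx + 1
--         while formed_sentence != sentence:
--             if formed_sentence:
--                 formed_sentence = " ".join([formed_sentence, edus[edu_idx]])
--             else:
--                 formed_sentence = edus[edu_idx]
--             edu_idx += 1
--         edu_spans.append((start_idx, edu_idx))
--     return edu_spans
-- ===== SOURCE B (Python) =====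
-- def get_edu_spans(sentences, edus):
--     # length-accounting: no string building/comparison at all.
--     lens = [len(e) for e in edus]
--     ends = []
--     k = 0
--     for sentence in sentences:
--         target = len(sentence)
--         acc = 0
--         while acc != target:
--             acc += lens[k] if acc == 0 else lens[k] + 1
--             k += 1
--         ends.append(k)
--     return [(s + 1, e) for s, e in zip([0] + ends[:-1], ends)]
-- ===== Notes on version B (the rewrite author's own statement) =====
-- stated objective: alternative
-- what changed: A repeatedly re-builds the space-joined string and compares it whole against the sentence; B never builds or compares a string: it precomputes the edu lengths once and advances a consumed-length counter per sentence, then assembles the spans in a second zip pass over the end indices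
import Mathlib
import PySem

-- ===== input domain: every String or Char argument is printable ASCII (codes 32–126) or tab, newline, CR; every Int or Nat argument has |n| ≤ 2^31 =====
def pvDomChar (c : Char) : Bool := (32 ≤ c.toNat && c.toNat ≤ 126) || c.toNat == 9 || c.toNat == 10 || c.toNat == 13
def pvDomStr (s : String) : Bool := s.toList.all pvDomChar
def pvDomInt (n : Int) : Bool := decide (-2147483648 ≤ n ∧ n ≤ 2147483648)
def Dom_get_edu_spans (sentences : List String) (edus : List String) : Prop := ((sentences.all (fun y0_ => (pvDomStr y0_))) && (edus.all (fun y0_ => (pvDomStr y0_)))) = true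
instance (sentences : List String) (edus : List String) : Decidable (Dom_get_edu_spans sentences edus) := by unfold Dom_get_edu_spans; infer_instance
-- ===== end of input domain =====

-- B replaces A's repeated string re-building and whole-string comparison by pure length
-- accounting over precomputed edu lengths, assembling the spans in a second zip pass
-- (objective: alternative — no string is ever built or compared).

-- ===== PORT A =====
-- inner while loop of A: formed_sentence kept as a list of chars; returns the final edu_idx,
-- none = IndexError (edus exhausted before formed_sentence equals the sentence)
def pvALoop (sent : List Char) (edus : List String) (formed : List Char) (i : Nat) : Option Nat :=
  if formed = sent then some i
  else
    match h : PySem.List.pyGet? edus (i : Int) with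
    | none => none
    | some e =>
      pvALoop sent edus (if formed ≠ [] then formed ++ ' ' :: e.toList else e.toList) (i + 1)
termination_by edus.length - i
decreasing_by
  have : (i : Int) < edus.length := by
    by_contra hge
    have : PySem.List.pyGet? edus (i : Int) = none := by
      simp [PySem.List.pyGet?_natCast]; omega
    simp [this] at h
  omega

-- outer for loop of A
def pvAOuter (edus : List String) (sentences : List String) (i : Nat) (spans : List (Int × Int)) :
    List (Int × Int) :=
  match sentences with
  | [] => spans
  | s :: rest =>
    match pvALoop s.toList edus [] i with
    | none => spans   -- IndexError in Python; excluded by Pre_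
    | some j => pvAOuter edus rest j (spans ++ [((i : Int) + 1, (j : Int))])

def get_edu_spans (sentences : List String) (edus : List String) : List (Int × Int) :=
  pvAOuter edus sentences 0 []

-- ===== PORT B =====
-- inner while loop of B: acc is the accumulated length; returns the final edu index k,
-- none = IndexError (lens exhausted)
def pvLenLoop (lens : List Nat) (target : Nat) (acc : Nat) (k : Nat) : Option Nat :=
  if acc = target then some k
  else
    match h : PySem.List.pyGet? lens (k : Int) with
    | none => none
    | some L => pvLenLoop lens target (if acc = 0 then acc + L else acc + (L + 1)) (k + 1)
termination_by lens.length - k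
decreasing_by
  have : (k : Int) < lens.length := by
    by_contra hge
    have : PySem.List.pyGet? lens (k : Int) = none := by
      simp [PySem.List.pyGet?_natCast]; omega
    simp [this] at h
  omega

-- first pass of B: the list of end indices, one per sentence
def pvEnds (lens : List Nat) (sentences : List String) (k : Nat) : Option (List Nat) :=
  match sentences with
  | [] => some []
  | s :: rest =>
    match pvLenLoop lens s.toList.length 0 k with
    | none => none   -- IndexError in Python; excluded by Pre_
    | some j =>
      match pvEnds lens rest j with
      | none => none
      | some es => some (j :: es)

def get_edu_spans_alt (sentences : List String) (edus : List String) : List (Int × Int) :=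
  let lens := edus.map (fun e => e.toList.length)
  match pvEnds lens sentences 0 with
  | none => []   -- IndexError in Python; excluded by Pre_
  | some ends =>
    ((0 :: PySem.List.slice ends none (some (-1))).zip ends).map
      (fun p => ((p.1 : Int) + 1, (p.2 : Int)))

-- ===== PRECONDITION & SPEC =====
-- Pre_ holds exactly on the inputs where the Python A returns normally: the edus, taken in order,
-- greedily reassemble every sentence (space-joined). Success of that parse has no non-recursive
-- characterisation, so it is stated via a structural matcher (distinct from both ports' code).
def pvEat : List String → List Char → Bool → Option (List String)
  | es, [], _ => some es
  | [], _ :: _, _ => none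
  | e :: rest, c :: cs, atStart =>
    let piece := if atStart then e.toList else ' ' :: e.toList
    if piece.isPrefixOf (c :: cs) then
      pvEat rest ((c :: cs).drop piece.length) (atStart && e.toList.isEmpty)
    else none

def pvParseAll (sentences : List String) (es : List String) : Bool :=
  match sentences with
  | [] => true
  | s :: ss =>
    match pvEat es s.toList true with
    | none => false
    | some es' => pvParseAll ss es'

def Pre_get_edu_spans (sentences : List String) (edus : List String) : Prop :=
  pvParseAll sentences edus = true
instance (sentences : List String) (edus : List String) : Decidable (Pre_get_edu_spans sentences edus) := by unfold Pre_get_edu_spans; infer_instance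

def pvWitness_get_edu_spans : List String × List String :=
  (["the cat sat", "it purred"], ["the cat", "sat", "it", "purred"])

def Spec_get_edu_spans (sentences : List String) (edus : List String) (out : List (Int × Int)) : Prop := out = get_edu_spans_alt sentences edus
instance (sentences : List String) (edus : List String) (out : List (Int × Int)) : Decidable (Spec_get_edu_spans sentences edus out) := by unfold Spec_get_edu_spans; infer_instance

-- ===== CLAIM (what is proved, stated in full; the proofs are below) =====
def Claim_equal_get_edu_spans : Prop := ∀ (sentences : List String) (edus : List String), Dom_get_edu_spans sentences edus → Pre_get_edu_spans sentences edus → Spec_get_edu_spans sentences edus (get_edu_spans sentences edus)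

-- ===== LEMMAS AND PROOFS =====

-- proof-only helper: a consumed-length pointer version of A's inner loop, the bridge between
-- A's string building and B's length accounting
def pvPtr (sent : List Char) (edus : List String) (pos : Nat) (i : Nat) : Option Nat :=
  if pos = sent.length then some i
  else
    match h : PySem.List.pyGet? edus (i : Int) with
    | none => none
    | some e =>
      let piece := if pos = 0 then e.toList else ' ' :: e.toList
      if piece.isPrefixOf (sent.drop pos) then pvPtr sent edus (pos + piece.length) (i + 1)
      else none
termination_by edus.length - i
decreasing_by
  have : (i : Int) < edus.length := by
    by_contra hge
    have : PySem.List.pyGet? edus (i : Int) = none := by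
      simp [PySem.List.pyGet?_natCast]; omega
    simp [this] at h
  omega

-- proof-only helper: the spans list B's final zip pass produces, in recursive form
def pvMkSpans (i : Nat) (ends : List Nat) : List (Int × Int) :=
  match ends with
  | [] => []
  | j :: rest => ((i : Int) + 1, (j : Int)) :: pvMkSpans j rest

theorem pvGet_some_lt {α : Type} {xs : List α} {i : Nat} {e : α}
    (h : PySem.List.pyGet? xs (i : Int) = some e) : i < xs.length := by
  rw [PySem.List.pyGet?_natCast] at h
  exact (List.getElem?_eq_some_iff.mp h).1

-- if formed is not a prefix of the sentence, A's inner loop can never reach equality and runs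
-- out of edus (returns none)
theorem pvALoop_not_prefix (edus : List String) :
    ∀ n sent formed i, edus.length - i = n → ¬ formed <+: sent →
      pvALoop sent edus formed i = none := by
  intro n
  induction n with
  | zero =>
    intro sent formed i hn hpre
    rw [pvALoop]
    have hne : formed ≠ sent := fun h => hpre (h ▸ List.prefix_refl _)
    rw [if_neg hne]
    cases hg : PySem.List.pyGet? edus (i : Int) with
    | none => simp
    | some e => exact absurd (pvGet_some_lt hg) (by omega)
  | succ m ih =>
    intro sent formed i hn hpre
    rw [pvALoop]
    have hne : formed ≠ sent := fun h => hpre (h ▸ List.prefix_refl _)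
    rw [if_neg hne]
    cases hg : PySem.List.pyGet? edus (i : Int) with
    | none => simp
    | some e =>
      simp only
      have hlt := pvGet_some_lt hg
      have hfne : formed ≠ [] := by
        intro h; exact hpre (h ▸ List.nil_prefix)
      rw [if_pos hfne]
      apply ih sent _ (i + 1) (by omega)
      intro hP
      exact hpre ((List.prefix_append formed (' ' :: e.toList)).trans hP)

-- A's inner loop agrees with the pointer loop when formed is the first pos characters
theorem pvALoop_eq_ptr (edus : List String) :
    ∀ n sent (pos i : Nat), edus.length - i = n → pos ≤ sent.length →
      pvALoop sent edus (sent.take pos) i = pvPtr sent edus pos i := by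
  intro n
  induction n with
  | zero =>
    intro sent pos i hn hpos
    rw [pvALoop, pvPtr]
    by_cases hp : pos = sent.length
    · subst hp; simp
    · have hne : sent.take pos ≠ sent := by
        intro h
        have := congrArg List.length h
        simp [List.length_take] at this; omega
      rw [if_neg hne, if_neg hp]
      cases hg : PySem.List.pyGet? edus (i : Int) with
      | none => simp
      | some e => exact absurd (pvGet_some_lt hg) (by omega)
  | succ m ih =>
    intro sent pos i hn hpos
    rw [pvALoop, pvPtr]
    by_cases hp : pos = sent.length
    · subst hp; simp
    · have hne : sent.take pos ≠ sent := by
        intro h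
        have := congrArg List.length h
        simp [List.length_take] at this; omega
      rw [if_neg hne, if_neg hp]
      cases hg : PySem.List.pyGet? edus (i : Int) with
      | none => simp
      | some e =>
        simp only
        have hlt := pvGet_some_lt hg
        set piece := (if pos = 0 then e.toList else ' ' :: e.toList) with hpiece
        have hformed :
            (if sent.take pos ≠ [] then sent.take pos ++ ' ' :: e.toList else e.toList)
              = sent.take pos ++ piece := by
          by_cases h0 : pos = 0
          · subst h0; simp [hpiece]
          · have htne : sent.take pos ≠ [] := by
              rw [ne_eq, List.take_eq_nil_iff]
              rintro (h | h)
              · exact h0 h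
              · subst h; simp at hpos; omega
            simp [htne, h0, hpiece]
        rw [hformed]
        by_cases hpre : piece.isPrefixOf (sent.drop pos) = true
        · rw [if_pos hpre]
          have hpre' := List.isPrefixOf_iff_prefix.mp hpre
          have hlen : piece.length ≤ sent.length - pos := by
            have h1 := hpre'.length_le
            rwa [List.length_drop] at h1
          have htake : sent.take (pos + piece.length) = sent.take pos ++ piece := by
            rw [List.take_add]
            congr 1
            exact (List.prefix_iff_eq_take.mp hpre').symm
          rw [← htake]
          have hple : pos + piece.length ≤ sent.length :=
            le_trans (Nat.add_le_add_left hlen pos) (by omega)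
          exact ih sent _ (i + 1) (by omega) hple
        · rw [if_neg hpre]
          apply pvALoop_not_prefix edus (edus.length - (i + 1)) _ _ (i + 1) rfl
          intro hP
          apply hpre
          rw [List.isPrefixOf_iff_prefix]
          have hP' : sent.take pos ++ piece <+: sent.take pos ++ sent.drop pos := by
            rw [List.take_append_drop]; exact hP
          exact (List.prefix_append_right_inj (sent.take pos)).mp hP'

-- when the pointer loop succeeds, B's length loop follows exactly the same steps
theorem pvPtr_to_len (edus : List String) :
    ∀ n sent (pos i j : Nat), edus.length - i = n →
      pvPtr sent edus pos i = some j →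
      pvLenLoop (edus.map (fun e => e.toList.length)) sent.length pos i = some j := by
  intro n
  induction n with
  | zero =>
    intro sent pos i j hn hptr
    rw [pvPtr] at hptr
    rw [pvLenLoop]
    by_cases hp : pos = sent.length
    · rw [if_pos hp] at hptr; rw [if_pos hp]; exact hptr
    · rw [if_neg hp] at hptr
      cases hg : PySem.List.pyGet? edus (i : Int) with
      | none => rw [hg] at hptr; simp at hptr
      | some e => exact absurd (pvGet_some_lt hg) (by omega)
  | succ m ih =>
    intro sent pos i j hn hptr
    rw [pvPtr] at hptr
    rw [pvLenLoop]
    by_cases hp : pos = sent.length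
    · rw [if_pos hp] at hptr; rw [if_pos hp]; exact hptr
    · rw [if_neg hp] at hptr; rw [if_neg hp]
      cases hg : PySem.List.pyGet? edus (i : Int) with
      | none => rw [hg] at hptr; simp at hptr
      | some e =>
        rw [hg] at hptr
        simp only at hptr
        have hgl : PySem.List.pyGet? (edus.map (fun e => e.toList.length)) (i : Int)
            = some e.toList.length := by
          rw [PySem.List.pyGet?_natCast] at hg ⊢
          simp [List.getElem?_map, hg]
        rw [hgl]
        simp only
        by_cases hpre : (if pos = 0 then e.toList else ' ' :: e.toList).isPrefixOf (sent.drop pos) = true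
        · rw [if_pos hpre] at hptr
          have harg : (if pos = 0 then pos + e.toList.length else pos + (e.toList.length + 1))
              = pos + (if pos = 0 then e.toList else ' ' :: e.toList).length := by
            by_cases h0 : pos = 0 <;> simp [h0]
          rw [harg]
          exact ih sent _ (i + 1) j (by have := pvGet_some_lt hg; omega) hptr
        · rw [if_neg hpre] at hptr; exact absurd hptr (by simp)

-- when the greedy matcher pvEat succeeds, the pointer loop succeeds and ends exactly where
-- the remaining edus begin
theorem pvEat_to_ptr (edus : List String) :
    ∀ n sent (pos i : Nat) rest, edus.length - i = n → pos ≤ sent.length →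
      pvEat (edus.drop i) (sent.drop pos) (pos == 0) = some rest →
      ∃ j, pvPtr sent edus pos i = some j ∧ edus.drop j = rest := by
  intro n
  induction n with
  | zero =>
    intro sent pos i rest hn hpos heat
    cases hd : sent.drop pos with
    | cons c cs =>
      rw [hd] at heat
      cases he : edus.drop i with
      | nil => rw [he] at heat; simp [pvEat] at heat
      | cons e t =>
        have : i < edus.length := by
          have := congrArg List.length he
          simp at this; omega
        omega
    | nil =>
      rw [hd] at heat
      have hpl : pos = sent.length := by
        have := congrArg List.length hd
        simp at this; omega
      refine ⟨i, ?_, ?_⟩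
      · rw [pvPtr, if_pos hpl]
      · simpa [pvEat] using heat
  | succ m ih =>
    intro sent pos i rest hn hpos heat
    cases hd : sent.drop pos with
    | nil =>
      rw [hd] at heat
      have hpl : pos = sent.length := by
        have := congrArg List.length hd
        simp at this; omega
      refine ⟨i, ?_, ?_⟩
      · rw [pvPtr, if_pos hpl]
      · simpa [pvEat] using heat
    | cons c cs =>
      rw [hd] at heat
      cases he : edus.drop i with
      | nil => rw [he] at heat; simp [pvEat] at heat
      | cons e t =>
        rw [he] at heat
        have hilt : i < edus.length := by
          have := congrArg List.length he
          simp at this; omega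
        have hg : PySem.List.pyGet? edus (i : Int) = some e := by
          rw [PySem.List.pyGet?_natCast]
          have h0 : (edus.drop i)[0]? = some e := by rw [he]; rfl
          rw [List.getElem?_drop] at h0
          simpa using h0
        have hplt : pos < sent.length := by
          have := congrArg List.length hd
          simp at this; omega
        rw [pvEat] at heat
        -- align pvEat's piece with pvPtr's piece
        have hbp : ((pos == 0) : Bool) = decide (pos = 0) := by
          by_cases h0 : pos = 0 <;> simp [h0]
        set piece := (if pos = 0 then e.toList else ' ' :: e.toList) with hpiece
        have hpieceE : (if (pos == 0) = true then e.toList else ' ' :: e.toList) = piece := by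
          by_cases h0 : pos = 0 <;> simp [h0, hpiece]
        rw [hpieceE] at heat
        by_cases hpre : piece.isPrefixOf (c :: cs) = true
        · rw [if_pos hpre] at heat
          have hpre' := List.isPrefixOf_iff_prefix.mp hpre
          have hlenp : pos + piece.length ≤ sent.length := by
            have h1 := hpre'.length_le
            have h2 := congrArg List.length hd
            simp only [List.length_drop, List.length_cons] at h1 h2
            omega
          have hdrop2 : (c :: cs).drop piece.length = sent.drop (pos + piece.length) := by
            rw [← hd, List.drop_drop]
          have hbool : (((pos + piece.length) == 0) : Bool) = ((pos == 0) && e.toList.isEmpty) := by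
            by_cases h0 : pos = 0
            · subst h0
              cases htl : e.toList <;> simp [hpiece, htl]
            · have h1 : (((pos + piece.length) == 0) : Bool) = false := by
                simp; omega
              have h2 : ((pos == 0) : Bool) = false := by simp [h0]
              rw [h1, h2, Bool.false_and]
          have ht : edus.drop (i + 1) = t := by
            have : edus.drop (i + 1) = (edus.drop i).tail := by
              rw [List.tail_drop]
            rw [this, he]; rfl
          rw [hdrop2, ← hbool] at heat
          rw [← ht] at heat
          obtain ⟨j, hj, hr⟩ := ih sent (pos + piece.length) (i + 1) rest (by omega)
            hlenp heat
          refine ⟨j, ?_, hr⟩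
          rw [pvPtr, if_neg (by omega), hg]
          simp only [← hpiece]
          rw [hd, if_pos hpre]
          exact hj
        · rw [if_neg hpre] at heat; exact absurd heat (by simp)

-- B's zip pass equals the recursive span builder
theorem pvZip_eq_mkSpans :
    ∀ (ends : List Nat) (i : Nat),
      ((i :: ends.dropLast).zip ends).map (fun p => ((p.1 : Int) + 1, (p.2 : Int)))
        = pvMkSpans i ends := by
  intro ends
  induction ends with
  | nil => intro i; rfl
  | cons j rest ih =>
    intro i
    cases rest with
    | nil => simp [pvMkSpans]
    | cons e es =>
      have h := ih j
      simp only [List.dropLast_cons₂, List.zip_cons_cons, List.map_cons, pvMkSpans] at h ⊢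
      rw [h]

-- main lemma: under a successful parse, A's outer loop and B's first pass agree
theorem pvMain (edus : List String) :
    ∀ (sents : List String) (i : Nat), pvParseAll sents (edus.drop i) = true →
      ∃ ends, pvEnds (edus.map (fun e => e.toList.length)) sents i = some ends ∧
        ∀ spans, pvAOuter edus sents i spans = spans ++ pvMkSpans i ends := by
  intro sents
  induction sents with
  | nil =>
    intro i _
    exact ⟨[], rfl, by intro spans; simp [pvAOuter, pvMkSpans]⟩
  | cons s rest ih =>
    intro i hparse
    rw [pvParseAll] at hparse
    cases heat : pvEat (edus.drop i) s.toList true with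
    | none => rw [heat] at hparse; simp at hparse
    | some es' =>
      rw [heat] at hparse
      simp only at hparse
      have heat0 : pvEat (edus.drop i) (s.toList.drop 0) ((0 : Nat) == 0) = some es' := by
        simpa using heat
      obtain ⟨j, hptr, hrest⟩ := pvEat_to_ptr edus (edus.length - i) s.toList 0 i es' rfl
        (Nat.zero_le _) heat0
      have hA : pvALoop s.toList edus [] i = some j := by
        have := pvALoop_eq_ptr edus (edus.length - i) s.toList 0 i rfl (Nat.zero_le _)
        simpa using this.trans hptr
      have hB := pvPtr_to_len edus (edus.length - i) s.toList 0 i j rfl hptr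
      obtain ⟨ends', hends', hspans'⟩ := ih j (by rw [hrest]; exact hparse)
      refine ⟨j :: ends', ?_, ?_⟩
      · rw [pvEnds, hB]; simp only [hends']
      · intro spans
        rw [pvAOuter, hA]
        simp only
        rw [hspans', pvMkSpans, List.append_assoc]
        rfl

-- ===== VERDICT (by name: the statement is the Claim_ definition above) =====
theorem get_edu_spans_spec : Claim_equal_get_edu_spans := by
  intro sentences edus _ hpre
  unfold Spec_get_edu_spans get_edu_spans get_edu_spans_alt
  obtain ⟨ends, hends, hspans⟩ := pvMain edus sentences 0 (by simpa [Pre_get_edu_spans] using hpre)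
  simp only [hends]
  rw [hspans []]
  rw [PySem.List.slice_to_neg_one]
  simp [pvZip_eq_mkSpans]
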